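-- pv_equiv track=rewrite | github.com/nbrody/nbrody.github.io | python/LongReid/beam_visualization/integerMatrices/WOWIntegerMatrices.py | reduce_word
-- ===== SOURCE A (Python) =====
-- INVERSES_MAP = {'a': 'ai', 'ai': 'a', 'b': 'bi', 'bi': 'b'}
--
-- def reduce_word(word_str):
--     if not word_str:
--         return ""
--     tokens = word_str.split(" . ")
--     stack = []
--     for t in tokens:
--         if stack and INVERSES_MAP.get(stack[-1]) == t:
--             stack.pop()
--         else:
--             stack.append(t)
--     return " . ".join(stack)
-- ===== SOURCE B (Python) =====
-- INVERSES_MAP = {'a': 'ai', 'ai': 'a', 'b': 'bi', 'bi': 'b'}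
--
--
-- def _one_pass(tokens):
--     """One left-to-right sweep: drop each non-overlapping adjacent inverse pair."""
--     out = []
--     i = 0
--     while i < len(tokens):
--         if i + 1 < len(tokens) and INVERSES_MAP.get(tokens[i]) == tokens[i + 1]:
--             i += 2
--         else:
--             out.append(tokens[i])
--             i += 1
--     return out
--
--
-- def reduce_word(word_str):
--     if not word_str:
--         return ""
--     tokens = word_str.split(" . ")
--     reduced = _one_pass(tokens)
--     while reduced != tokens:
--         tokens = reduced
--         reduced = _one_pass(tokens)
--     return " . ".join(tokens)
-- ===== Notes on version B (the rewrite author's own statement) =====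
-- stated objective: alternative
-- what changed: Replaces A's single stack pass with repeated left-to-right sweeps that each delete non-overlapping adjacent inverse pairs, iterated to a fixpoint; same unique reduced word, no stack.
import Mathlib
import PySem

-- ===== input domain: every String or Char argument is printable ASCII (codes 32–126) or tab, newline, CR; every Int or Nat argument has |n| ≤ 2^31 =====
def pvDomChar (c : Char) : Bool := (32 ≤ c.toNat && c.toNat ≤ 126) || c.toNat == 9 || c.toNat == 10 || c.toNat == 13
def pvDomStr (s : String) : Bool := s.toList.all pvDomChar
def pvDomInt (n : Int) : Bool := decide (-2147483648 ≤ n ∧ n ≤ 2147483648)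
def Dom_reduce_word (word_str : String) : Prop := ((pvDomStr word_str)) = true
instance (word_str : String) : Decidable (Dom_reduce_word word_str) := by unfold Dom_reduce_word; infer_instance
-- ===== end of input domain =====

-- B replaces A's one stack pass by repeated pair-deleting sweeps iterated to a fixpoint
-- (alternative decomposition; same reduced word, no speed claim).

-- ===== PORT A =====
-- INVERSES_MAP = {'a': 'ai', 'ai': 'a', 'b': 'bi', 'bi': 'b'}
def INVERSES_MAP : PySem.Dict String String :=
  PySem.Dict.mk [("a", "ai"), ("ai", "a"), ("b", "bi"), ("bi", "b")]

-- one iteration of A's for-loop body ('if stack and INVERSES_MAP.get(stack[-1]) == t';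
-- 'stack' is truthy iff it has a last element, 'stack[-1]' is then that last element)
def pvStepA (stack : List String) (t : String) : List String :=
  match stack.getLast? with
  | some l => if INVERSES_MAP.get? l = some t then stack.dropLast else stack ++ [t]
  | none => stack ++ [t]

def reduce_word (word_str : String) : String :=
  if word_str = "" then ""
  else
    let tokens := (PySem.Str.split? word_str " . ").getD []   -- sep " . " ≠ "", split? is always some
    PySem.Str.join " . " (tokens.foldl pvStepA [])

-- ===== PORT B =====
-- _one_pass: the while loop consumes one or two tokens from the front per step,
-- appending the survivors in order; ported as recursion on the token list.
def pvOnePass : List String → List String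
  | [] => []
  | [x] => [x]
  | x :: y :: rest =>
      if INVERSES_MAP.get? x = some y then pvOnePass rest
      else x :: pvOnePass (y :: rest)
termination_by l => l.length

theorem pvOnePass_length_le (l : List String) : (pvOnePass l).length ≤ l.length := by
  induction l using pvOnePass.induct with
  | case1 => rw [pvOnePass]
  | case2 x => rw [pvOnePass]
  | case3 x y rest h ih => rw [pvOnePass, if_pos h]; simp only [List.length_cons]; omega
  | case4 x y rest h ih => rw [pvOnePass, if_neg h]; simp only [List.length_cons] at *; omega

theorem pvOnePass_length_lt (l : List String) (hne : pvOnePass l ≠ l) :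
    (pvOnePass l).length < l.length := by
  induction l using pvOnePass.induct with
  | case1 => exact absurd (by rw [pvOnePass]) hne
  | case2 x => exact absurd (by rw [pvOnePass]) hne
  | case3 x y rest h ih =>
      rw [pvOnePass, if_pos h]
      have := pvOnePass_length_le rest
      simp only [List.length_cons]; omega
  | case4 x y rest h ih =>
      rw [pvOnePass, if_neg h]
      rw [pvOnePass, if_neg h] at hne
      have hsub : pvOnePass (y :: rest) ≠ y :: rest := fun he => hne (by rw [he])
      have := ih hsub
      simp only [List.length_cons] at *; omega

-- B's 'while reduced != tokens' loop, iterating _one_pass to a fixpoint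
def pvFix (tokens : List String) : List String :=
  let reduced := pvOnePass tokens
  if h : reduced = tokens then tokens else pvFix reduced
termination_by tokens.length
decreasing_by exact pvOnePass_length_lt tokens h

def reduce_word_alt (word_str : String) : String :=
  if word_str = "" then ""
  else PySem.Str.join " . " (pvFix ((PySem.Str.split? word_str " . ").getD []))

-- ===== PRECONDITION & SPEC =====
def Spec_reduce_word (word_str : String) (out : String) : Prop := out = reduce_word_alt word_str
instance (word_str : String) (out : String) : Decidable (Spec_reduce_word word_str out) := by unfold Spec_reduce_word; infer_instance

-- ===== CLAIM (what is proved, stated in full; the proofs are below) =====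
def Claim_equal_reduce_word : Prop := ∀ (word_str : String), Dom_reduce_word word_str → Spec_reduce_word word_str (reduce_word word_str)

-- ===== LEMMAS AND PROOFS =====

-- the inverse map is symmetric: a ↔ ai, b ↔ bi
theorem pvInvSymm {x y : String} (h : INVERSES_MAP.get? x = some y) :
    INVERSES_MAP.get? y = some x := by
  have hx : x = "a" ∨ x = "ai" ∨ x = "b" ∨ x = "bi" := by
    by_contra hc
    push Not at hc
    obtain ⟨h1, h2, h3, h4⟩ := hc
    simp [INVERSES_MAP, PySem.Dict.get?,
      Ne.symm h1, Ne.symm h2, Ne.symm h3, Ne.symm h4] at h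
  rcases hx with rfl | rfl | rfl | rfl <;>
    simp_all [INVERSES_MAP, PySem.Dict.get?_mk_cons] <;> subst h <;> decide

-- "reduced": no adjacent inverse pair
def pvRed (l : List String) : Prop := l.IsChain (fun u v => INVERSES_MAP.get? u ≠ some v)

theorem pvRed_step {a : List String} (ha : pvRed a) (t : String) : pvRed (pvStepA a t) := by
  induction a using List.reverseRecOn with
  | nil => simp [pvStepA, pvRed]
  | append_singleton b l _ =>
      unfold pvStepA
      simp only [List.getLast?_concat]
      split
      · simpa using (ha.prefix ⟨[l], rfl⟩)
      · refine (List.isChain_append).mpr ⟨ha, by simp, ?_⟩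
        intro u hu v hv
        simp only [List.getLast?_concat, Option.mem_def, Option.some.injEq] at hu
        simp only [List.head?_cons, Option.mem_def, Option.some.injEq] at hv
        subst hu; subst hv
        assumption

-- cancelling an adjacent inverse pair against a reduced accumulator is a no-op
theorem pvCancel {x y : String} (hxy : INVERSES_MAP.get? x = some y)
    {a : List String} (ha : pvRed a) : pvStepA (pvStepA a x) y = a := by
  induction a using List.reverseRecOn with
  | nil => simp [pvStepA, hxy]
  | append_singleton b l _ =>
      by_cases hlx : INVERSES_MAP.get? l = some x
      · have hyl : y = l := by
          have := pvInvSymm hlx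
          rw [hxy] at this
          exact Option.some.inj this
        subst hyl
        simp only [pvStepA, List.getLast?_concat, hlx, if_pos, List.dropLast_concat]
        induction b using List.reverseRecOn with
        | nil => simp [pvStepA]
        | append_singleton c m _ =>
            have hjunction : INVERSES_MAP.get? m ≠ some y := by
              have := (List.isChain_append (l₁ := c ++ [m]) (l₂ := [y])).mp ha
              exact this.2.2 m (by simp) y (by simp)
            simp [pvStepA, List.getLast?_concat, hjunction]
      · simp [pvStepA, List.getLast?_concat, hlx, hxy, List.dropLast_concat]

-- a fold of A's step over a word already reduced against the accumulator just appends
theorem pvFoldRed : ∀ (ts acc : List String), pvRed (acc ++ ts) →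
    ts.foldl pvStepA acc = acc ++ ts
  | [], acc, _ => by simp
  | t :: r, acc, h => by
      have hstep : pvStepA acc t = acc ++ [t] := by
        induction acc using List.reverseRecOn with
        | nil => simp [pvStepA]
        | append_singleton b m _ =>
            have hj : INVERSES_MAP.get? m ≠ some t := by
              have := (List.isChain_append (l₁ := b ++ [m]) (l₂ := t :: r)).mp h
              exact this.2.2 m (by simp) t (by simp)
            simp [pvStepA, List.getLast?_concat, hj]
      have h' : pvRed ((acc ++ [t]) ++ r) := by simpa [pvRed] using h
      calc (t :: r).foldl pvStepA acc = r.foldl pvStepA (acc ++ [t]) := by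
              simp [List.foldl_cons, hstep]
        _ = (acc ++ [t]) ++ r := pvFoldRed r (acc ++ [t]) h'
        _ = acc ++ t :: r := by simp

-- a fixpoint of one sweep has no adjacent inverse pair
theorem pvFixpointRed : ∀ l : List String, pvOnePass l = l → pvRed l
  | [] => fun _ => by simp [pvRed]
  | [x] => fun _ => by simp [pvRed]
  | x :: y :: rest => fun h => by
      rw [pvOnePass] at h
      split at h
      · exfalso
        have := pvOnePass_length_le rest
        have := congrArg List.length h
        simp at this; omega
      · have htail : pvOnePass (y :: rest) = y :: rest := by
          injection h
        exact List.isChain_cons_cons.mpr ⟨by assumption, pvFixpointRed (y :: rest) htail⟩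
termination_by l => l.length

-- one sweep does not change what A's fold computes (from any reduced accumulator)
theorem pvSweepFold : ∀ (ts acc : List String), pvRed acc →
    (pvOnePass ts).foldl pvStepA acc = ts.foldl pvStepA acc
  | [], _, _ => by rw [pvOnePass]
  | [x], _, _ => by rw [pvOnePass]
  | x :: y :: rest, acc, ha => by
      rw [pvOnePass]
      split
      · calc (pvOnePass rest).foldl pvStepA acc
              = rest.foldl pvStepA acc := pvSweepFold rest acc ha
          _ = rest.foldl pvStepA (pvStepA (pvStepA acc x) y) := by
              rw [pvCancel (by assumption) ha]
          _ = (x :: y :: rest).foldl pvStepA acc := by simp [List.foldl_cons]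
      · calc (x :: pvOnePass (y :: rest)).foldl pvStepA acc
              = (pvOnePass (y :: rest)).foldl pvStepA (pvStepA acc x) := by
              simp [List.foldl_cons]
          _ = (y :: rest).foldl pvStepA (pvStepA acc x) :=
              pvSweepFold (y :: rest) (pvStepA acc x) (pvRed_step ha x)
          _ = (x :: y :: rest).foldl pvStepA acc := by simp [List.foldl_cons]
termination_by ts => ts.length

-- main list-level theorem: B's fixpoint iteration equals A's stack fold
theorem pv_main : ∀ ts : List String, pvFix ts = ts.foldl pvStepA [] := fun ts => by
  rw [pvFix]
  split
  · have hred : pvRed ts := pvFixpointRed ts (by assumption)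
    have := pvFoldRed ts [] (by simpa using hred)
    simp [this]
  · have hlt := pvOnePass_length_lt ts (by assumption)
    calc pvFix (pvOnePass ts) = (pvOnePass ts).foldl pvStepA [] := pv_main (pvOnePass ts)
      _ = ts.foldl pvStepA [] := pvSweepFold ts [] (by simp [pvRed])
termination_by ts => ts.length

-- ===== VERDICT (by name: the statement is the Claim_ definition above) =====
theorem reduce_word_spec : Claim_equal_reduce_word := by
  intro w _
  unfold Spec_reduce_word reduce_word reduce_word_alt
  split
  · rfl
  · simp [pv_main]
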